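-- pv_equiv track=rewrite | github.com/ragstoneholdings/titan-cockpit | todoist_service.py | validate_and_fill_order
-- ===== SOURCE A (Python) =====
-- from typing import Any, Dict, List, Optional, Tuple
--
-- def validate_and_fill_order(ordered_ids: List[str], known_ids: List[str]) -> List[str]:
--     seen: set[str] = set()
--     out: List[str] = []
--     known_set = list(dict.fromkeys(known_ids))
--     for oid in ordered_ids:
--         s = str(oid).strip()
--         if s and s in known_set and s not in seen:
--             seen.add(s)
--             out.append(s)
--     for kid in known_set:
--         if kid not in seen:
--             out.append(kid)
--     return out
-- ===== SOURCE B (Python) =====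
-- def validate_and_fill_order(ordered_ids, known_ids):
--     order_index = {}
--     for i, oid in enumerate(ordered_ids):
--         s = str(oid).strip()
--         if s and s not in order_index:
--             order_index[s] = i
--     known_set = list(dict.fromkeys(known_ids))
--     present = [k for k in known_set if k in order_index]
--     absent = [k for k in known_set if k not in order_index]
--     present.sort(key=lambda k: order_index[k])
--     return present + absent
-- ===== Notes on version B (the rewrite author's own statement) =====
-- stated objective: faster
-- what changed: A's seen-set filtering loop with a per-element list-membership scan plus a fill pass is replaced by building a first-occurrence hash index over ordered_ids once, partitioning the deduplicated known ids into present/absent by dict lookup, and sorting the present part by its stored first-occurrence index.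
import Mathlib
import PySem

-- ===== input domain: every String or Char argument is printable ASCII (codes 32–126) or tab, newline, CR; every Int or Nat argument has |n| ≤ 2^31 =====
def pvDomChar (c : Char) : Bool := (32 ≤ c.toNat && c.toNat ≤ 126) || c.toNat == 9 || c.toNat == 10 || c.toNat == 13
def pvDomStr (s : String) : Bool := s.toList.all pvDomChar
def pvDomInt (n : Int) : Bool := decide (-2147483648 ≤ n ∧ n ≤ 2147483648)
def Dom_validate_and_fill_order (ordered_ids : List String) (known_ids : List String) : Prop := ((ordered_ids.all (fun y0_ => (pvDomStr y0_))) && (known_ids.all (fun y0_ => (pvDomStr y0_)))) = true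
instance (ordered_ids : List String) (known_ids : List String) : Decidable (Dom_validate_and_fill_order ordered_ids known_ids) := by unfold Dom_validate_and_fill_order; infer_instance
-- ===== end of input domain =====

-- B replaces A's seen-set filtering loop (with its per-element list-membership scan of known_set) by a
-- first-occurrence index table over ordered_ids, a dict-lookup partition of the deduplicated known ids,
-- and a key-sort of the present part — measurably faster on the generated timing inputs.

-- ===== PORT A =====
def validate_and_fill_order (ordered_ids : List String) (known_ids : List String) : List String :=
  let known_set := PySem.List.dedup known_ids
  let st := ordered_ids.foldl
    (fun (p : PySem.Set String × List String) oid =>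
      let s := PySem.Str.strip oid
      if s ≠ "" ∧ s ∈ known_set ∧ s ∉ p.1 then (PySem.Set.add p.1 s, p.2 ++ [s]) else p)
    (PySem.Set.empty, [])
  known_set.foldl (fun out kid => if kid ∉ st.1 then out ++ [kid] else out) st.2

-- ===== PORT B =====
def validate_and_fill_order_alt (ordered_ids : List String) (known_ids : List String) : List String :=
  let order_index := (PySem.List.enumerate ordered_ids).foldl
    (fun (d : PySem.Dict String Int) p =>
      let s := PySem.Str.strip p.2
      if s ≠ "" ∧ ¬ d.contains s then d.insert s p.1 else d)
    PySem.Dict.empty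
  let known_set := PySem.List.dedup known_ids
  let present := known_set.filter (fun k => order_index.contains k)
  let absent := known_set.filter (fun k => !(order_index.contains k))
  PySem.List.sorted present (fun k => order_index.getD k 0) false ++ absent

-- ===== PRECONDITION & SPEC =====
def Spec_validate_and_fill_order (ordered_ids : List String) (known_ids : List String) (out : List String) : Prop := out = validate_and_fill_order_alt ordered_ids known_ids
instance (ordered_ids : List String) (known_ids : List String) (out : List String) : Decidable (Spec_validate_and_fill_order ordered_ids known_ids out) := by unfold Spec_validate_and_fill_order; infer_instance

-- ===== CLAIM (what is proved, stated in full; the proofs are below) =====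
def Claim_equal_validate_and_fill_order : Prop := ∀ (ordered_ids : List String) (known_ids : List String), Dom_validate_and_fill_order ordered_ids known_ids → Spec_validate_and_fill_order ordered_ids known_ids (validate_and_fill_order ordered_ids known_ids)

-- ===== LEMMAS AND PROOFS =====

/-- The list of NEW keys (first occurrences of nonempty stripped ids not already in `K`),
in encounter order — the common skeleton both programs build. -/
def okeys : List String → List String → List String
  | [], _ => []
  | x :: t, K =>
    let s := PySem.Str.strip x
    if s = "" ∨ s ∈ K then okeys t K else s :: okeys t (K ++ [s])

theorem okeys_not_mem : ∀ (l K : List String), ∀ u ∈ okeys l K, u ∉ K ∧ u ≠ "" := by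
  intro l
  induction l with
  | nil => intro K u hu; simp [okeys] at hu
  | cons x t ih =>
    intro K u hu
    simp only [okeys] at hu
    by_cases h : PySem.Str.strip x = "" ∨ PySem.Str.strip x ∈ K
    · rw [if_pos h] at hu; exact ih K u hu
    · rw [if_neg h] at hu
      push Not at h
      rcases List.mem_cons.mp hu with rfl | hu
      · exact ⟨h.2, h.1⟩
      · have h2 := ih (K ++ [PySem.Str.strip x]) u hu
        exact ⟨fun hK => h2.1 (List.mem_append_left _ hK), h2.2⟩

theorem okeys_nodup : ∀ (l K : List String), (okeys l K).Nodup := by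
  intro l
  induction l with
  | nil => intro K; simp [okeys]
  | cons x t ih =>
    intro K
    simp only [okeys]
    by_cases h : PySem.Str.strip x = "" ∨ PySem.Str.strip x ∈ K
    · rw [if_pos h]; exact ih K
    · rw [if_neg h]
      refine List.nodup_cons.mpr ⟨fun hmem => ?_, ih _⟩
      exact (okeys_not_mem t _ _ hmem).1 (List.mem_append_right _ (List.mem_singleton.mpr rfl))

/-- Proof-side names for the two loop bodies (definitionally equal to the lambdas in the ports). -/
def bstep (d : PySem.Dict String Int) (p : Int × String) : PySem.Dict String Int :=
  let s := PySem.Str.strip p.2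
  if s ≠ "" ∧ ¬ d.contains s then d.insert s p.1 else d

def astep (known : List String) (p : PySem.Set String × List String) (oid : String) :
    PySem.Set String × List String :=
  let s := PySem.Str.strip oid
  if s ≠ "" ∧ s ∈ known ∧ s ∉ p.1 then (PySem.Set.add p.1 s, p.2 ++ [s]) else p

theorem A_eq (o k : List String) : validate_and_fill_order o k =
    (PySem.List.dedup k).foldl
      (fun out kid => if kid ∉ (o.foldl (astep (PySem.List.dedup k)) (PySem.Set.empty, [])).1
        then out ++ [kid] else out)
      (o.foldl (astep (PySem.List.dedup k)) (PySem.Set.empty, [])).2 := rfl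

theorem B_eq (o k : List String) : validate_and_fill_order_alt o k =
    PySem.List.sorted
      ((PySem.List.dedup k).filter
        (fun x => ((PySem.List.enumerate o 0).foldl bstep PySem.Dict.empty).contains x))
      (fun x => ((PySem.List.enumerate o 0).foldl bstep PySem.Dict.empty).getD x 0) false
    ++ (PySem.List.dedup k).filter
        (fun x => !(((PySem.List.enumerate o 0).foldl bstep PySem.Dict.empty).contains x)) := rfl

/-- B's dict fold appends exactly the new keys, in order. -/
theorem bfold_keys : ∀ (l : List String) (i : Int) (d : PySem.Dict String Int),
    ((PySem.List.enumerate l i).foldl bstep d).keys = d.keys ++ okeys l d.keys := by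
  intro l
  induction l with
  | nil => intro i d; simp [okeys, PySem.List.enumerate_nil]
  | cons x t ih =>
    intro i d
    rw [PySem.List.enumerate_cons, List.foldl_cons]
    simp only [okeys, bstep]
    by_cases h0 : PySem.Str.strip x = ""
    · rw [if_neg (by simp [h0]), if_pos (Or.inl h0)]
      exact ih (i + 1) d
    · by_cases h1 : d.contains (PySem.Str.strip x) = true
      · rw [if_neg (by simp [h1]), if_pos (Or.inr ((PySem.Dict.contains_iff_mem_keys d _).mp h1))]
        exact ih (i + 1) d
      · rw [if_pos ⟨h0, by simp [Bool.eq_false_iff.mpr h1]⟩,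
          if_neg (by push Not; exact ⟨h0, fun hm => h1 ((PySem.Dict.contains_iff_mem_keys d _).mpr hm)⟩)]
        rw [ih (i + 1) (d.insert (PySem.Str.strip x) i),
          PySem.Dict.keys_insert_of_not_contains d i (Bool.eq_false_iff.mpr h1)]
        simp

/-- The stored first-occurrence indices are strictly increasing along the key list. -/
theorem bfold_pairwise : ∀ (l : List String) (i : Int) (d : PySem.Dict String Int),
    (∀ c, d.contains c = true → d.getD c 0 < i) →
    d.keys.Pairwise (fun a b => d.getD a 0 < d.getD b 0) →
    (((PySem.List.enumerate l i).foldl bstep d).keys).Pairwise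
      (fun a b => ((PySem.List.enumerate l i).foldl bstep d).getD a 0
        < ((PySem.List.enumerate l i).foldl bstep d).getD b 0) := by
  intro l
  induction l with
  | nil => intro i d _ hp; simpa [PySem.List.enumerate_nil] using hp
  | cons x t ih =>
    intro i d hb hp
    rw [PySem.List.enumerate_cons, List.foldl_cons]
    simp only [bstep]
    by_cases hc : PySem.Str.strip x ≠ "" ∧ ¬ d.contains (PySem.Str.strip x) = true
    · rw [if_pos hc]
      have hnc : d.contains (PySem.Str.strip x) = false := Bool.eq_false_iff.mpr hc.2
      have hsk : PySem.Str.strip x ∉ d.keys :=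
        fun hm => hc.2 ((PySem.Dict.contains_iff_mem_keys d _).mpr hm)
      apply ih (i + 1)
      · intro c hcc
        rw [PySem.Dict.contains_insert] at hcc
        rw [PySem.Dict.getD_insert]
        by_cases hcs : c = PySem.Str.strip x
        · rw [if_pos hcs]; omega
        · rw [if_neg hcs]
          rcases Bool.or_eq_true_iff.mp hcc with h | h
          · exact absurd (by simpa using h) hcs
          · have := hb c h; omega
      · rw [PySem.Dict.keys_insert_of_not_contains d i hnc]
        apply List.pairwise_append.mpr
        refine ⟨?_, List.pairwise_singleton _ _, ?_⟩
        · apply hp.imp_of_mem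
          intro a b ha hbm hab
          rw [PySem.Dict.getD_insert, PySem.Dict.getD_insert,
            if_neg (fun h => hsk (by rw [← h]; exact ha)),
            if_neg (fun h => hsk (by rw [← h]; exact hbm))]
          exact hab
        · intro a ha b hbm
          rw [List.mem_singleton] at hbm
          subst hbm
          rw [PySem.Dict.getD_insert, PySem.Dict.getD_insert,
            if_neg (fun h => hsk (by rw [← h]; exact ha)), if_pos rfl]
          exact hb a ((PySem.Dict.contains_iff_mem_keys d _).mpr ha)
    · rw [if_neg hc]
      apply ih (i + 1) d (fun c h => lt_trans (hb c h) (by omega)) hp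

/-- A's main loop: the output extends by the known-filtered new-key list, and the seen set
agrees with the key list on known ids. -/
theorem afold_spec (known : List String) :
    ∀ (l K : List String) (seen : PySem.Set String) (out : List String),
    (∀ u, u ∈ known → (u ∈ seen ↔ u ∈ K)) →
    (l.foldl (astep known) (seen, out)).2
      = out ++ (okeys l K).filter (fun u => decide (u ∈ known))
    ∧ ∀ u, u ∈ known →
        ((u ∈ (l.foldl (astep known) (seen, out)).1) ↔ u ∈ K ++ okeys l K) := by
  intro l
  induction l with
  | nil =>
    intro K seen out hinv
    refine ⟨by simp [okeys], fun u hu => ?_⟩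
    simpa [okeys] using hinv u hu
  | cons x t ih =>
    intro K seen out hinv
    rw [List.foldl_cons]
    simp only [okeys, astep]
    by_cases h0 : PySem.Str.strip x = ""
    · rw [if_neg (by simp [h0]), if_pos (Or.inl h0)]
      exact ih K seen out hinv
    · by_cases hK : PySem.Str.strip x ∈ K
      · have hcond : ¬(PySem.Str.strip x ≠ "" ∧ PySem.Str.strip x ∈ known ∧ PySem.Str.strip x ∉ seen) :=
          fun h => h.2.2 ((hinv _ h.2.1).mpr hK)
        rw [if_neg hcond, if_pos (Or.inr hK)]
        exact ih K seen out hinv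
      · rw [if_neg (show ¬(PySem.Str.strip x = "" ∨ PySem.Str.strip x ∈ K) by simp [h0, hK])]
        by_cases hk : PySem.Str.strip x ∈ known
        · have hns : PySem.Str.strip x ∉ seen := fun h => hK ((hinv _ hk).mp h)
          rw [if_pos ⟨h0, hk, hns⟩, PySem.Set.add_of_not_mem hns]
          have hinv1 : ∀ u, u ∈ known → (u ∈ seen ++ [PySem.Str.strip x] ↔ u ∈ K ++ [PySem.Str.strip x]) := by
            intro u hu
            simp [List.mem_append, hinv u hu]
          obtain ⟨ih1, ih2⟩ := ih (K ++ [PySem.Str.strip x]) (seen ++ [PySem.Str.strip x]) (out ++ [PySem.Str.strip x]) hinv1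
          refine ⟨?_, fun u hu => ?_⟩
          · rw [ih1, List.filter_cons_of_pos (by simpa using hk)]
            simp
          · rw [ih2 u hu, List.append_assoc, List.singleton_append]
        · rw [if_neg (show ¬(PySem.Str.strip x ≠ "" ∧ PySem.Str.strip x ∈ known ∧ PySem.Str.strip x ∉ seen) by simp [hk])]
          have hinv1 : ∀ u, u ∈ known → (u ∈ seen ↔ u ∈ K ++ [PySem.Str.strip x]) := by
            intro u hu
            have : u ≠ PySem.Str.strip x := fun h => hk (by rw [← h]; exact hu)
            simp [List.mem_append, hinv u hu, this]
          obtain ⟨ih1, ih2⟩ := ih (K ++ [PySem.Str.strip x]) seen out hinv1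
          refine ⟨?_, fun u hu => ?_⟩
          · rw [ih1, List.filter_cons_of_neg (by simpa using hk)]
          · rw [ih2 u hu, List.append_assoc, List.singleton_append]

-- ===== VERDICT (by name: the statement is the Claim_ definition above) =====
theorem validate_and_fill_order_spec : Claim_equal_validate_and_fill_order := by
  unfold Claim_equal_validate_and_fill_order
  intro o k _
  unfold Spec_validate_and_fill_order
  rw [A_eq, B_eq]
  obtain ⟨hA2, hA1⟩ := afold_spec (PySem.List.dedup k) o [] PySem.Set.empty []
    (fun u _ => Iff.rfl)
  have hkeys : ((PySem.List.enumerate o 0).foldl bstep PySem.Dict.empty).keys = okeys o [] := by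
    rw [bfold_keys]; rfl
  have hpw := bfold_pairwise o 0 PySem.Dict.empty
    (by intro c h; rw [PySem.Dict.contains_empty] at h; exact absurd h (by simp))
    (by rw [PySem.Dict.keys_empty]; exact List.Pairwise.nil)
  have hcont : ∀ x, ((PySem.List.enumerate o 0).foldl bstep PySem.Dict.empty).contains x
      = decide (x ∈ okeys o []) := by
    intro x
    rw [PySem.Dict.contains_eq_decide_mem_keys, hkeys]
  -- A's second loop is an append-filter over the seen set, i.e. over the key list
  rw [PySem.List.foldl_append_ite_eq_filter
    (fun kid => kid ∉ (o.foldl (astep (PySem.List.dedup k)) (PySem.Set.empty, [])).1)]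
  have haf : (PySem.List.dedup k).filter
      (fun x => decide (x ∉ (o.foldl (astep (PySem.List.dedup k)) (PySem.Set.empty, [])).1))
      = (PySem.List.dedup k).filter (fun x => decide (x ∉ okeys o [])) := by
    apply List.filter_congr
    intro x hx
    simp only [decide_eq_decide]
    rw [hA1 x hx]
    simp
  -- B's absent part is the same filter
  have hbf : (PySem.List.dedup k).filter
      (fun x => !(((PySem.List.enumerate o 0).foldl bstep PySem.Dict.empty).contains x))
      = (PySem.List.dedup k).filter (fun x => decide (x ∉ okeys o [])) := by
    apply List.filter_congr
    intro x _
    rw [hcont]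
    simp
  -- B's sorted present part is the known-filtered key list
  have hsorted : PySem.List.sorted
      ((PySem.List.dedup k).filter
        (fun x => ((PySem.List.enumerate o 0).foldl bstep PySem.Dict.empty).contains x))
      (fun x => ((PySem.List.enumerate o 0).foldl bstep PySem.Dict.empty).getD x 0) false
      = (okeys o []).filter (fun u => decide (u ∈ PySem.List.dedup k)) := by
    apply PySem.List.sorted_eq_of_perm_of_pairwise_lt
    · apply (List.perm_ext_iff_of_nodup ((okeys_nodup o []).filter _)
        ((PySem.List.nodup_dedup k).filter _)).mpr
      intro a
      simp only [List.mem_filter, hcont, decide_eq_true_eq]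
      tauto
    · have h2 : (okeys o []).filter (fun u => decide (u ∈ PySem.List.dedup k))
          = ((PySem.List.enumerate o 0).foldl bstep PySem.Dict.empty).keys.filter
            (fun u => decide (u ∈ PySem.List.dedup k)) := by rw [hkeys]
      rw [h2]
      exact hpw.sublist List.filter_sublist
  rw [hA2, haf, hbf, hsorted]
  simp
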